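-- pv_equiv track=rewrite | github.com/giacomobais/TagInsert | models/Variant1/scripts/preprocess.py | get_atomic_labels
-- ===== SOURCE A (Python) =====
-- def get_atomic_labels(vocab_CCG):
--     """ Get the atomic labels from the CCG supertags. """
--     atomic_labels = []
--     ignore_chars = set(['(', ')', '/',  '\\'])
--     for supertag in vocab_CCG:
--         current_label = []
--         flag = 0
--         for i, char in enumerate(supertag):
--             if char not in ignore_chars:
--                 flag = 1
--                 current_label.append(char)
--             if flag == 1 and (char in ignore_chars or i == len(supertag) - 1):
--                 # construct a string from the list
--                 string_label = ''.join(current_label)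
--                 atomic_labels.append(string_label)
--                 current_label = []
--                 flag = 0
--     return sorted(list(set(atomic_labels)))
-- ===== SOURCE B (Python) =====
-- def get_atomic_labels(vocab_CCG):
--     """ Get the atomic labels from the CCG supertags. """
--     labels = set()
--     for supertag in vocab_CCG:
--         cleaned = supertag.replace(')', '(').replace('/', '(').replace('\\', '(')
--         labels.update(t for t in cleaned.split('(') if t)
--     return sorted(labels)
-- ===== Notes on version B (the rewrite author's own statement) =====
-- stated objective: idiomatic
-- what changed: Replaces the hand-rolled per-character automaton (flag + current_label buffer + last-index check) with library string operations: translate the four delimiter characters to one, split on it, keep the non-empty pieces, and collect them into a set built incrementally.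
import Mathlib
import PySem

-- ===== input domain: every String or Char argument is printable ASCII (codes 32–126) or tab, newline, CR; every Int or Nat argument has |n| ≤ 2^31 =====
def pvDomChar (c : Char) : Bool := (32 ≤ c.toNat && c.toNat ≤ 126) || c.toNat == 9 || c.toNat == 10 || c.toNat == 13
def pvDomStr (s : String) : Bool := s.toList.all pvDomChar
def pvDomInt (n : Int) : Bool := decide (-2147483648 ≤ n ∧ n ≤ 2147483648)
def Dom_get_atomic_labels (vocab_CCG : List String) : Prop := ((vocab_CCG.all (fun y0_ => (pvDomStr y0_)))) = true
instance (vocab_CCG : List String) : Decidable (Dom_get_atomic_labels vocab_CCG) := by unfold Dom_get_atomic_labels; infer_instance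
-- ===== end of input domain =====

-- B replaces A's per-character flag automaton by library string calls (translate the four
-- delimiters to one, split on it, keep the non-empty pieces) collected into a set; objective: idiomatic.


-- ===== PORT A =====
-- ignore_chars = set(['(', ')', '/', '\\'])
def pvIgnore : PySem.Set Char := PySem.Set.ofList ['(', ')', '/', '\\']

-- body of A's inner 'for i, char in enumerate(supertag)' loop;
-- state = (atomic_labels, current_label, flag); ''.join(current_label) = String.ofList
def pvStepA (n : Int) (st : List String × List Char × Int) (p : Int × Char) : List String × List Char × Int :=
  let labels := st.1
  let cur := st.2.1
  let flag := st.2.2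
  let (cur, flag) :=
    if ¬ (PySem.Set.contains pvIgnore p.2 = true) then (cur ++ [p.2], (1 : Int)) else (cur, flag)
  if flag = 1 ∧ (PySem.Set.contains pvIgnore p.2 = true ∨ p.1 = n - 1) then
    (labels ++ [String.ofList cur], [], 0)
  else (labels, cur, flag)

def get_atomic_labels (vocab_CCG : List String) : List String :=
  PySem.List.sorted
    (PySem.Set.ofList (vocab_CCG.foldl (fun atomic_labels supertag =>
      ((PySem.List.enumerate supertag.toList).foldl
          (pvStepA (PySem.Str.len supertag)) (atomic_labels, [], 0)).1) []))
    (fun x => x) false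

-- ===== PORT B =====
-- tokens of one supertag: translate ')' '/' '\\' to '(', split on '(' (a nonempty separator,
-- so Chars.splitOn on the char lists is exact for .split('(')), keep truthy (non-empty) pieces
def pvTokens (supertag : String) : List String :=
  ((PySem.Chars.splitOn
      (PySem.Str.replace (PySem.Str.replace (PySem.Str.replace supertag ")" "(") "/" "(") "\\" "(").toList
      ['(']).map String.ofList).filter (fun t => t ≠ "")

def get_atomic_labels_alt (vocab_CCG : List String) : List String :=
  PySem.List.sorted
    (vocab_CCG.foldl (fun labels supertag => PySem.Set.update labels (pvTokens supertag)) PySem.Set.empty)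
    (fun x => x) false

-- ===== PRECONDITION & SPEC =====
def Spec_get_atomic_labels (vocab_CCG : List String) (out : List String) : Prop := out = get_atomic_labels_alt vocab_CCG
instance (vocab_CCG : List String) (out : List String) : Decidable (Spec_get_atomic_labels vocab_CCG out) := by unfold Spec_get_atomic_labels; infer_instance

-- ===== CLAIM (what is proved, stated in full; the proofs are below) =====
def Claim_equal_get_atomic_labels : Prop := ∀ (vocab_CCG : List String), Dom_get_atomic_labels vocab_CCG → Spec_get_atomic_labels vocab_CCG (get_atomic_labels vocab_CCG)

-- ===== LEMMAS AND PROOFS =====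

-- the reference tokenizer both ports are reduced to
def pvIsDelim (c : Char) : Bool := ['(', ')', '/', '\\'].contains c

def pvSubst (c : Char) : Char := if c == ')' then '(' else if c == '/' then '(' else if c == '\\' then '(' else c

def pvSplitBy (p : Char → Bool) : List Char → List (List Char)
  | [] => [[]]
  | c :: rest => if p c then [] :: pvSplitBy p rest else (pvSplitBy p rest).modifyHead (c :: ·)

def pvToks : List Char → List Char → List (List Char)
  | [], cur => if cur = [] then [] else [cur]
  | c :: rest, cur =>
      if pvIsDelim c then (if cur = [] then pvToks rest [] else cur :: pvToks rest [])
      else pvToks rest (cur ++ [c])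

lemma pvSplitBy_ne_nil (p : Char → Bool) (l : List Char) : pvSplitBy p l ≠ [] := by
  induction l with
  | nil => simp [pvSplitBy]
  | cons c t ih =>
    simp only [pvSplitBy]
    split
    · simp
    · intro h
      exact ih (List.eq_nil_of_length_eq_zero (by simpa using congrArg List.length h))

lemma pvSplitBy_cons_exists (p : Char → Bool) (l : List Char) :
    ∃ h tl, pvSplitBy p l = h :: tl := by
  cases hs : pvSplitBy p l with
  | nil => exact absurd hs (pvSplitBy_ne_nil _ _)
  | cons h tl => exact ⟨h, tl, rfl⟩

-- ----- A-side reduction -----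
lemma pvMem_ignore (c : Char) : (c ∈ pvIgnore) ↔ pvIsDelim c = true := by
  have h : pvIgnore = ['(', ')', '/', '\\'] := by decide
  rw [h]; simp [pvIsDelim]

lemma pvEnum_cons (c : Char) (t : List Char) (i : Int) :
    PySem.List.enumerate (c :: t) i = (i, c) :: PySem.List.enumerate t (i + 1) := by
  simp [PySem.List.enumerate]

lemma pvEnum_nil (i : Int) : PySem.List.enumerate ([] : List Char) i = [] := by
  simp [PySem.List.enumerate]

lemma pvStepA_fold (rest : List Char) :
    ∀ (i n : Int) (labels : List String) (cur : List Char),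
      rest ≠ [] → i + rest.length = n →
      (PySem.List.enumerate rest i).foldl (pvStepA n) (labels, cur, if cur = [] then (0 : Int) else 1)
        = (labels ++ (pvToks rest cur).map String.ofList, [], 0) := by
  induction rest with
  | nil => intro _ _ _ _ h _; exact absurd rfl h
  | cons c t ih =>
    intro i n labels cur _ hn
    simp only [List.length_cons] at hn
    rw [pvEnum_cons, List.foldl_cons]
    by_cases hd : pvIsDelim c
    · by_cases hc : cur = []
      · subst hc
        have hstep : pvStepA n (labels, ([] : List Char), if ([] : List Char) = [] then (0:Int) else 1) (i, c)
            = (labels, [], if ([] : List Char) = [] then (0:Int) else 1) := by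
          simp [pvStepA, pvMem_ignore, hd]
        rw [hstep]
        cases t with
        | nil =>
          rw [pvEnum_nil]
          simp [pvToks, hd, List.foldl_nil]
        | cons d u =>
          rw [ih (i+1) n labels [] (by simp) (by push_cast [List.length_cons, List.length_nil] at hn ⊢; omega)]
          simp [pvToks, hd]
      · have hstep : pvStepA n (labels, cur, if cur = [] then (0:Int) else 1) (i, c)
            = (labels ++ [String.ofList cur], [], if ([] : List Char) = [] then (0:Int) else 1) := by
          simp [pvStepA, pvMem_ignore, hd, hc]
        rw [hstep]
        cases t with
        | nil =>
          rw [pvEnum_nil]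
          simp [pvToks, hd, hc, List.foldl_nil]
        | cons d u =>
          rw [ih (i+1) n (labels ++ [String.ofList cur]) [] (by simp) (by push_cast [List.length_cons, List.length_nil] at hn ⊢; omega)]
          simp [pvToks, hd, hc]
    · have hb : pvIsDelim c = false := by simpa using hd
      cases t with
      | nil =>
        have hlast : i = n - 1 := by push_cast [List.length_cons, List.length_nil] at hn; omega
        have hstep : pvStepA n (labels, cur, if cur = [] then (0:Int) else 1) (i, c)
            = (labels ++ [String.ofList (cur ++ [c])], [], 0) := by
          simp [pvStepA, pvMem_ignore, hb, hlast]
        rw [hstep, pvEnum_nil]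
        simp [pvToks, hb, List.foldl_nil]
      | cons d u =>
        have hmid : i ≠ n - 1 := by push_cast [List.length_cons, List.length_nil] at hn; omega
        have hstep : pvStepA n (labels, cur, if cur = [] then (0:Int) else 1) (i, c)
            = (labels, cur ++ [c], if (cur ++ [c]) = [] then (0:Int) else 1) := by
          simp [pvStepA, pvMem_ignore, hb, hmid]
        rw [hstep]
        rw [ih (i+1) n labels (cur ++ [c]) (by simp) (by push_cast [List.length_cons, List.length_nil] at hn ⊢; omega)]
        simp [pvToks, hb]

-- A's per-supertag loop yields exactly the reference tokens
lemma pvA_tag (labels : List String) (s : String) :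
    ((PySem.List.enumerate s.toList).foldl (pvStepA (PySem.Str.len s)) (labels, [], 0)).1
      = labels ++ (pvToks s.toList []).map String.ofList := by
  cases hs : s.toList with
  | nil => rw [pvEnum_nil]; simp [pvToks]
  | cons c t =>
    have hn : (0 : Int) + (c :: t).length = PySem.Str.len s := by
      rw [PySem.Str.len_eq, hs]; omega
    have hfold := pvStepA_fold (c :: t) 0 (PySem.Str.len s) labels [] (by simp) hn
    simp only [if_true] at hfold
    rw [hfold]

-- ----- B-side reduction -----
lemma pvReplace_go_single (o n : Char) :
    ∀ (l : List Char) (acc : List Char) (fuel : Nat), l.length ≤ fuel →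
      PySem.Chars.replace.go [o] [n] fuel l acc
        = acc.reverse ++ l.map (fun c => if c == o then n else c) := by
  intro l
  induction l with
  | nil =>
    intro acc fuel _
    cases fuel <;> simp [PySem.Chars.replace.go]
  | cons c t ih =>
    intro acc fuel hf
    cases fuel with
    | zero => simp at hf
    | succ k =>
      rw [PySem.Chars.replace.go]
      have hp : [o].isPrefixOf (c :: t) = (o == c) := by simp [List.isPrefixOf]
      rw [hp]
      simp only [List.length_cons] at hf
      by_cases hc : c = o
      · subst hc
        simp only [beq_self_eq_true, if_pos, List.length_cons, List.length_nil, List.drop_succ_cons, List.drop_zero]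
        rw [ih _ k (by omega)]
        simp
      · have h1 : (o == c) = false := by simpa using fun h => hc h.symm
        rw [h1]
        simp only [Bool.false_eq_true, if_false]
        rw [ih _ k (by omega)]
        simp only [List.map_cons, beq_iff_eq, if_neg hc]
        simp

lemma pvReplace_single (o n : Char) (l : List Char) :
    PySem.Chars.replace l [o] [n] = l.map (fun c => if c == o then n else c) := by
  rw [PySem.Chars.replace]
  simp only [List.isEmpty_cons, Bool.false_eq_true, if_false]
  rw [pvReplace_go_single o n l [] l.length le_rfl]
  simp

lemma pvSplitOn_go (l : List Char) :
    ∀ (fuel : Nat) (cur : List Char) (acc : List (List Char)), l.length < fuel →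
      PySem.Chars.splitOn.go ['('] fuel l cur acc
        = acc.reverse ++ (pvSplitBy (· == '(') l).modifyHead (fun x => cur.reverse ++ x) := by
  induction l with
  | nil =>
    intro fuel cur acc hf
    cases fuel with
    | zero => omega
    | succ k =>
      rw [PySem.Chars.splitOn.go]
      · simp [pvSplitBy]
      · omega
  | cons c t ih =>
    intro fuel cur acc hf
    cases fuel with
    | zero => omega
    | succ k =>
      rw [PySem.Chars.splitOn.go]
      have hp : ['('].isPrefixOf (c :: t) = ('(' == c) := by simp [List.isPrefixOf]
      rw [hp]
      by_cases hc : c = '('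
      · subst hc
        simp only [beq_self_eq_true, if_pos, List.length_cons, List.length_nil, List.drop_succ_cons, List.drop_zero]
        rw [ih k [] _ (by simp at hf ⊢; omega)]
        obtain ⟨h, tl, hh⟩ := pvSplitBy_cons_exists (· == '(') t
        simp [pvSplitBy, hh, List.modifyHead]
      · have h1 : ('(' == c) = false := by simpa using fun h => hc h.symm
        rw [h1]
        simp only [Bool.false_eq_true, if_false]
        rw [ih k (c :: cur) acc (by simp at hf ⊢; omega)]
        have h2 : (c == '(') = false := by simpa using hc
        simp only [pvSplitBy, h2, Bool.false_eq_true, if_false, List.modifyHead_modifyHead]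
        congr 1
        obtain ⟨h, tl, hh⟩ := pvSplitBy_cons_exists (· == '(') t
        rw [hh]
        simp [List.modifyHead]

lemma pvSplitOn_paren (l : List Char) :
    PySem.Chars.splitOn l ['('] = pvSplitBy (· == '(') l := by
  have h : PySem.Chars.splitOn l ['('] = PySem.Chars.splitOn.go ['('] (l.length + 1) l [] [] := rfl
  rw [h, pvSplitOn_go l (l.length + 1) [] [] (by omega)]
  obtain ⟨hd, tl, hh⟩ := pvSplitBy_cons_exists (· == '(') l
  rw [hh]
  simp [List.modifyHead]

lemma pvSubst_comp (c : Char) :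
    (fun c => if c == '\\' then '(' else c) ((fun c => if c == '/' then '(' else c) ((fun c => if c == ')' then '(' else c) c)) = pvSubst c := by
  by_cases h2 : c = ')'
  · subst h2; decide
  by_cases h3 : c = '/'
  · subst h3; decide
  by_cases h4 : c = '\\'
  · subst h4; decide
  simp [pvSubst, h2, h3, h4]

lemma pvSubst_beq (c : Char) : (pvSubst c == '(') = pvIsDelim c := by
  by_cases h1 : c = '('
  · subst h1; decide
  by_cases h2 : c = ')'
  · subst h2; decide
  by_cases h3 : c = '/'
  · subst h3; decide
  by_cases h4 : c = '\\'
  · subst h4; decide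
  have h : pvSubst c = c := by simp [pvSubst, h2, h3, h4]
  rw [h]
  simp [pvIsDelim, h1, h2, h3, h4]

lemma pvSubst_ne (c : Char) (h : pvIsDelim c = false) : pvSubst c = c := by
  simp [pvIsDelim] at h
  simp [pvSubst, h.2.1, h.2.2.1, h.2.2.2]

lemma pvSplitBy_subst (l : List Char) :
    pvSplitBy (· == '(') (l.map pvSubst) = pvSplitBy pvIsDelim l := by
  induction l with
  | nil => rfl
  | cons c t ih =>
    by_cases hd : pvIsDelim c
    · simp [pvSplitBy, pvSubst_beq, hd, ih]
    · have hb : pvIsDelim c = false := by simpa using hd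
      have hp : c ≠ '(' := fun h => by subst h; exact hd (by decide)
      simp [pvSplitBy, hb, ih, pvSubst_ne c hb, hp]

lemma pvFilter_split (l : List Char) :
    ∀ cur : List Char,
      ((pvSplitBy pvIsDelim l).modifyHead (fun x => cur ++ x)).filter (fun t => t ≠ []) = pvToks l cur := by
  induction l with
  | nil =>
    intro cur
    by_cases h : cur = [] <;> simp [pvSplitBy, pvToks, List.modifyHead, List.filter, h]
  | cons c t ih =>
    intro cur
    by_cases hd : pvIsDelim c
    · simp only [pvSplitBy, pvToks, hd, if_pos]
      obtain ⟨h, tl, hh⟩ := pvSplitBy_cons_exists pvIsDelim t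
      have ih0 := ih []
      rw [hh] at ih0
      simp only [List.modifyHead, List.nil_append] at ih0
      rw [hh]
      by_cases hc : cur = []
      · subst hc
        simpa [List.modifyHead] using ih0
      · simpa [List.modifyHead, List.filter_cons, hc] using ih0
    · have hb : pvIsDelim c = false := by simpa using hd
      simp only [pvSplitBy, pvToks, hb, Bool.false_eq_true, if_false, List.modifyHead_modifyHead]
      rw [← ih (cur ++ [c])]
      congr 1
      obtain ⟨h, tl, hh⟩ := pvSplitBy_cons_exists pvIsDelim t
      rw [hh]
      simp [List.modifyHead]

-- B's per-supertag tokens are exactly the reference tokens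
lemma pvTokens_eq (s : String) :
    pvTokens s = (pvToks s.toList []).map String.ofList := by
  have hclean :
      (PySem.Str.replace (PySem.Str.replace (PySem.Str.replace s ")" "(") "/" "(") "\\" "(").toList
        = s.toList.map pvSubst := by
    simp only [PySem.Str.replace, String.toList_ofList,
      show (")" : String).toList = [')'] from by decide, show ("/" : String).toList = ['/'] from by decide,
      show ("\\" : String).toList = ['\\'] from by decide, show ("(" : String).toList = ['('] from by decide]
    rw [pvReplace_single, pvReplace_single, pvReplace_single]
    simp only [List.map_map]
    exact List.map_congr_left (fun c _ => pvSubst_comp c)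
  unfold pvTokens
  rw [hclean, pvSplitOn_paren, pvSplitBy_subst]
  rw [List.filter_map]
  have hpred : ∀ t ∈ pvSplitBy pvIsDelim s.toList,
      ((fun t => decide (t ≠ "")) ∘ String.ofList) t = (fun t => decide (t ≠ [])) t := by
    intro t _
    simp [Function.comp]
  rw [List.filter_congr hpred]
  refine congrArg (List.map String.ofList) ?_
  have h0 : pvSplitBy pvIsDelim s.toList
      = (pvSplitBy pvIsDelim s.toList).modifyHead (fun x => ([] : List Char) ++ x) := by
    obtain ⟨h, tl, hh⟩ := pvSplitBy_cons_exists pvIsDelim s.toList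
    rw [hh]; simp [List.modifyHead]
  rw [h0, pvFilter_split s.toList []]

-- ----- assembling the two folds -----
lemma pvB_fold (l : List String) :
    ∀ acc : PySem.Set String,
      l.foldl (fun a t => PySem.Set.update a (pvTokens t)) acc
        = PySem.Set.update acc (l.flatMap pvTokens) := by
  induction l with
  | nil => intro acc; simp [PySem.Set.update]
  | cons s t ih =>
    intro acc
    rw [List.foldl_cons, ih]
    simp [PySem.Set.update, List.foldl_append]

-- ===== VERDICT (by name: the statement is the Claim_ definition above) =====
theorem get_atomic_labels_spec : Claim_equal_get_atomic_labels := by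
  intro vocab _
  unfold Spec_get_atomic_labels get_atomic_labels get_atomic_labels_alt
  have hA : vocab.foldl (fun atomic_labels supertag =>
      ((PySem.List.enumerate supertag.toList).foldl
          (pvStepA (PySem.Str.len supertag)) (atomic_labels, [], 0)).1) []
      = vocab.flatMap (fun s => (pvToks s.toList []).map String.ofList) := by
    rw [PySem.List.foldl_congr_mem vocab _
        (fun acc s => acc ++ (pvToks s.toList []).map String.ofList) []
        (fun acc s _ => pvA_tag acc s)]
    rw [PySem.List.foldl_append_eq_flatMap]
    simp
  have hB : vocab.foldl (fun labels supertag => PySem.Set.update labels (pvTokens supertag)) PySem.Set.empty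
      = PySem.Set.ofList (vocab.flatMap (fun s => (pvToks s.toList []).map String.ofList)) := by
    rw [pvB_fold]
    rw [show pvTokens = (fun s => (pvToks s.toList []).map String.ofList) from funext pvTokens_eq]
    rfl
  rw [hA, hB]
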